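-- pv_equiv track=rewrite | github.com/TyrionGump/leetcode | 566.reshape-the-matrix.py | matrixReshape
-- ===== SOURCE A (Python) =====
-- from typing import List
--
-- def matrixReshape(mat: List[List[int]], r: int, c: int) -> List[List[int]]:
--
--     original_rows = len(mat)
--     original_cols = len(mat[0])
--
--     # Early exit if reshaping is not possible
--     if original_rows * original_cols != r * c:
--         return mat
--
--     reshaped_mat = []
--     flat_list = []
--     for row in mat:
--         flat_list.extend(row)
--
--     for i in range(0, len(flat_list), c):
--         reshaped_mat.append(flat_list[i:i+c])
--
--     return reshaped_mat
-- ===== SOURCE B (Python) =====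
-- from typing import List
--
-- def matrixReshape(mat: List[List[int]], r: int, c: int) -> List[List[int]]:
--     rows, cols = len(mat), len(mat[0])
--     if rows * cols != r * c:
--         return mat
--     return [[mat[k // cols][k % cols] for k in range(i * c, i * c + c)]
--             for i in range(r)]
-- ===== Notes on version B (the rewrite author's own statement) =====
-- stated objective: alternative
-- what changed: B replaces A's flatten-into-a-temporary-list-then-chunk-by-slicing with direct index arithmetic: each output element is read straight from the source as mat[k // cols][k % cols] for the linear index k = i*c + j, so no intermediate flat list is built.
-- outside the precondition, e.g. on matrixReshape([[1, 2], [3]], 2, 2): A returns [[1, 2], [3]], B raises IndexError; on matrixReshape([[1], [2, 3]], 2, 1): A returns [[1], [2], [3]], B returns [[1], [2]]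
import Mathlib
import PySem

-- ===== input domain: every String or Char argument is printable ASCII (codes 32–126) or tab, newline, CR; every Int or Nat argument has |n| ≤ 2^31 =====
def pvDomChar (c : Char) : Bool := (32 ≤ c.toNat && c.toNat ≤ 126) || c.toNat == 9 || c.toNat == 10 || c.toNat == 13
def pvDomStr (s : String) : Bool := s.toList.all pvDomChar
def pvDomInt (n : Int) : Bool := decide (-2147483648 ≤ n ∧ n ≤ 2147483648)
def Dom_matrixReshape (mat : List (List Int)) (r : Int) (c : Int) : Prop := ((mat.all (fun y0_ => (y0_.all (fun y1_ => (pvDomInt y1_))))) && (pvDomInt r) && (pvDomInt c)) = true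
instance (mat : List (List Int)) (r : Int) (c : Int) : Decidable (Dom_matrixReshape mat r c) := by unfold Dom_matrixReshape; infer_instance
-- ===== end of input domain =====

-- B avoids A's intermediate flat list by reading each output element directly via divmod index
-- arithmetic (objective: alternative decomposition, same asymptotic cost).

-- ===== PORT A =====
def matrixReshape (mat : List (List Int)) (r : Int) (c : Int) : List (List Int) :=
  match PySem.List.pyGet? mat 0 with
  | none => []  -- Python raises IndexError on len(mat[0]) here; excluded by Pre_
  | some row0 =>
    if ((mat.length : Int) * (row0.length : Int) ≠ r * c) then mat
    else
      let flat : List Int := mat.foldl (fun acc row => acc ++ row) []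
      (PySem.List.pyRange 0 (flat.length : Int) c).foldl
        (fun acc i => acc ++ [PySem.List.slice flat (some i) (some (i + c))]) []

-- ===== PORT B =====
def matrixReshape_alt (mat : List (List Int)) (r : Int) (c : Int) : List (List Int) :=
  match PySem.List.pyGet? mat 0 with
  | none => []  -- Python raises IndexError on len(mat[0]) here; excluded by Pre_
  | some row0 =>
    let cols : Int := row0.length
    if ((mat.length : Int) * cols ≠ r * c) then mat
    else
      (PySem.List.pyRange 0 r 1).map (fun i =>
        (PySem.List.pyRange (i * c) (i * c + c) 1).map (fun k =>
          PySem.List.pyGetD (PySem.List.pyGetD mat (PySem.Int.floordiv k cols) [])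
            (PySem.Int.mod k cols) 0))

-- ===== PRECONDITION & SPEC =====
-- Pre_ excludes: empty mat, where A raises IndexError on mat[0]; and, when the size guard passes,
-- c = 0, where A raises ValueError (range step 0), and ragged matrices, where A's value (flatten a
-- ragged matrix and chunk it, after a guard that only looked at the first row's length) is an
-- accident of its implementation while B's positional indexing raises or reads row-by-position.
def Pre_matrixReshape (mat : List (List Int)) (r : Int) (c : Int) : Prop :=
  mat ≠ [] ∧ ((mat.length : Int) * (mat.headI.length : Int) = r * c →
    ((∀ row ∈ mat, row.length = mat.headI.length) ∧ c ≠ 0))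
instance (mat : List (List Int)) (r : Int) (c : Int) : Decidable (Pre_matrixReshape mat r c) := by
  unfold Pre_matrixReshape; infer_instance

def pvWitness_matrixReshape : List (List Int) × Int × Int := ([[1, 2], [3, 4]], 4, 1)

def Spec_matrixReshape (mat : List (List Int)) (r : Int) (c : Int) (out : List (List Int)) : Prop := out = matrixReshape_alt mat r c
instance (mat : List (List Int)) (r : Int) (c : Int) (out : List (List Int)) : Decidable (Spec_matrixReshape mat r c out) := by unfold Spec_matrixReshape; infer_instance

-- ===== CLAIM (what is proved, stated in full; the proofs are below) =====
def Claim_equal_matrixReshape : Prop := ∀ (mat : List (List Int)) (r : Int) (c : Int), Dom_matrixReshape mat r c → Pre_matrixReshape mat r c → Spec_matrixReshape mat r c (matrixReshape mat r c)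

-- ===== LEMMAS AND PROOFS =====

lemma pyRange_zero_neg_empty (n : Nat) (c : Int) (hc : c < 0) :
    PySem.List.pyRange 0 (n : Int) c = [] := by
  simp only [PySem.List.pyRange]
  split_ifs <;> first | rfl | omega

lemma pyRange_zero_one_nonpos (r : Int) (hr : r ≤ 0) :
    PySem.List.pyRange 0 r 1 = [] := by
  simp only [PySem.List.pyRange]
  split_ifs <;> first | rfl | omega

lemma pyRange_zero_zero (c : Int) : PySem.List.pyRange 0 0 c = [] := by
  simp only [PySem.List.pyRange]
  split_ifs <;> first | rfl | omega

lemma foldl_append_flatten (mat : List (List Int)) :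
    mat.foldl (fun acc row => acc ++ row) [] = mat.flatten := by
  rw [PySem.List.foldl_append_eq_flatMap (fun row => row) mat []]
  simp

lemma flatten_length_rect (mat : List (List Int)) (m : Nat)
    (hrect : ∀ row ∈ mat, row.length = m) :
    mat.flatten.length = mat.length * m := by
  induction mat with
  | nil => simp
  | cons row rest ih =>
    have h1 : row.length = m := hrect row (by simp)
    have h2 : rest.flatten.length = rest.length * m :=
      ih (fun q hq => hrect q (by simp [hq]))
    simp only [List.flatten_cons, List.length_append, List.length_cons, h1, h2]
    ring

lemma flat_getD (mat : List (List Int)) (m : Nat) (hm : 0 < m)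
    (hrect : ∀ row ∈ mat, row.length = m) (k : Nat) (hk : k < mat.length * m) :
    mat.flatten.getD k 0 = (mat.getD (k / m) []).getD (k % m) 0 := by
  induction mat generalizing k with
  | nil => simp at hk
  | cons row rest ih =>
    have hrow : row.length = m := hrect row (by simp)
    by_cases hkm : k < m
    · rw [Nat.div_eq_of_lt hkm, Nat.mod_eq_of_lt hkm]
      simp only [List.flatten_cons, List.getD_cons_zero]
      rw [List.getD_append _ _ _ _ (by omega)]
    · obtain ⟨k0, rfl⟩ : ∃ k0, k = m + k0 := ⟨k - m, by omega⟩
      have hdiv : (m + k0) / m = k0 / m + 1 := by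
        rw [Nat.add_div_left _ hm]
      have hmod : (m + k0) % m = k0 % m := Nat.add_mod_left m k0
      rw [hdiv, hmod]
      simp only [List.flatten_cons, List.getD_cons_succ]
      rw [List.getD_append_right _ _ _ _ (by omega)]
      rw [hrow, Nat.add_sub_cancel_left]
      exact ih (fun q hq => hrect q (by simp [hq])) k0
        (by simp only [List.length_cons, Nat.succ_mul] at hk; omega)

lemma take_drop_map_getD (l : List Int) (a n : Nat) (h : a + n ≤ l.length) :
    (l.drop a).take n = (List.range n).map (fun j => l.getD (a + j) 0) := by
  apply List.ext_getElem
  · simp; omega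
  · intro i h1 h2
    have hlen : i < n := by simpa using h2
    have hi : a + i < l.length := by omega
    simp only [List.getElem_take, List.getElem_drop, List.getElem_map, List.getElem_range]
    rw [List.getD_eq_getElem l 0 hi]

-- ===== VERDICT (by name: the statement is the Claim_ definition above) =====
theorem matrixReshape_spec : Claim_equal_matrixReshape := by
  intro mat r c _ hpre
  obtain ⟨hne, hg⟩ := hpre
  unfold Spec_matrixReshape
  cases mat with
  | nil => exact absurd rfl hne
  | cons row0 rest =>
    simp only [List.headI] at hg
    have hhead : PySem.List.pyGet? (row0 :: rest) (0 : Int) = some row0 := by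
      simp [PySem.List.pyGet?, PySem.List.pyIdx?]
    rw [matrixReshape, matrixReshape_alt, hhead]
    simp only []
    by_cases hguard : (((row0 :: rest).length : Int) * (row0.length : Int) = r * c)
    · obtain ⟨hrect, hc0⟩ := hg hguard
      rw [if_neg (by simpa using hguard), if_neg (by simpa using hguard)]
      rw [foldl_append_flatten]
      set mat := row0 :: rest with hmat
      set m := row0.length with hm
      have hflatlen : mat.flatten.length = mat.length * m := flatten_length_rect mat m hrect
      rcases lt_trichotomy c 0 with hcneg | hczero | hcpos
      · -- c < 0 : both sides are empty
        have hr0 : r ≤ 0 := by nlinarith [hguard, Int.natCast_nonneg mat.length, Int.natCast_nonneg m]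
        rw [hflatlen, pyRange_zero_neg_empty _ _ hcneg, pyRange_zero_one_nonpos r hr0]
        simp
      · exact absurd hczero hc0
      · -- c > 0
        by_cases hrpos : 0 < r
        · -- main case
          lift c to Nat using hcpos.le with c'
          lift r to Nat using hrpos.le with r'
          have hc' : 0 < c' := by exact_mod_cast hcpos
          have hr' : 0 < r' := by exact_mod_cast hrpos
          have hsz : mat.length * m = r' * c' := by exact_mod_cast hguard
          have hmpos : 0 < m := by
            rcases Nat.eq_zero_or_pos m with h0 | h; · exfalso; rw [h0] at hsz; simp at hsz; omega
            · exact h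
          rw [hflatlen, hsz]
          -- A side: foldl append-singleton is a map over the chunk starts
          rw [PySem.List.foldl_append_singleton_eq_map
            (fun i => PySem.List.slice mat.flatten (some i) (some (i + (c' : Int)))) _ []]
          rw [List.nil_append]
          rw [PySem.List.pyRange_of_pos 0 ((r' * c' : Nat) : Int) hcpos]
          have hcount : (if (0 : Int) < ((r' * c' : Nat) : Int)
              then ((((r' * c' : Nat) : Int) - 0 + (c' : Int) - 1) / (c' : Int)).toNat else 0) = r' := by
            rw [if_pos (by exact_mod_cast Nat.mul_pos hr' hc')]
            have e1 : (((r' * c' : Nat) : Int) - 0 + (c' : Int) - 1) = ((c' * r' + (c' - 1) : Nat) : Int) := by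
              push_cast [Nat.cast_sub hc']; ring
            rw [e1, ← Int.natCast_div, Int.toNat_natCast,
              Nat.mul_add_div hc', Nat.div_eq_of_lt (by omega), Nat.add_zero]
          rw [hcount, List.map_map]
          -- B side
          rw [show PySem.List.pyRange 0 ((r' : Nat) : Int) 1 = PySem.List.pyRange 0 ((r' : Nat) : Int) from rfl,
            PySem.List.pyRange_zero_natCast r', List.map_map]
          apply List.map_congr_left
          intro k hk
          have hkr : k < r' := List.mem_range.mp hk
          simp only [Function.comp]
          -- A row k
          have e2 : ((0 : Int) + (c' : Int) * (k : Int)) = ((c' * k : Nat) : Int) := by push_cast; ring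
          rw [e2, show ((c' * k : Nat) : Int) + (c' : Int) = ((c' * k : Nat) : Int) + ((c' : Nat) : Int) from rfl,
            PySem.List.slice_natCast_add]
          rw [take_drop_map_getD _ _ _ (by rw [hflatlen, hsz]; calc
            c' * k + c' = c' * (k + 1) := by ring
            _ ≤ c' * r' := Nat.mul_le_mul_left c' (by omega)
            _ = r' * c' := Nat.mul_comm c' r')]
          -- B row k
          rw [PySem.List.pyRange_of_pos ((k : Int) * (c' : Int)) ((k : Int) * (c' : Int) + (c' : Int)) Int.one_pos]
          have hcnt2 : (if (k : Int) * (c' : Int) < (k : Int) * (c' : Int) + (c' : Int)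
              then (((k : Int) * (c' : Int) + (c' : Int) - (k : Int) * (c' : Int) + 1 - 1) / 1).toNat else 0) = c' := by
            rw [if_pos (by omega)]
            omega
          rw [hcnt2, List.map_map]
          apply List.map_congr_left
          intro j hj
          have hjc : j < c' := List.mem_range.mp hj
          simp only [Function.comp]
          have e3 : ((k : Int) * (c' : Int) + 1 * (j : Int)) = ((k * c' + j : Nat) : Int) := by push_cast; ring
          rw [e3]
          rw [PySem.Int.floordiv_natCast, PySem.Int.mod_natCast,
            PySem.List.pyGetD_natCast, PySem.List.pyGetD_natCast]
          rw [show c' * k + j = k * c' + j from by ring]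
          exact flat_getD mat m hmpos hrect (k * c' + j)
            (by rw [hsz]; calc
              k * c' + j < k * c' + c' := by omega
              _ = (k + 1) * c' := by ring
              _ ≤ r' * c' := Nat.mul_le_mul_right c' (by omega))
        · -- c > 0, r ≤ 0 : sizes force everything empty
          have hrle : r ≤ 0 := not_lt.mp hrpos
          have hr0 : r = 0 := by nlinarith [hguard, hrle, hcpos, Int.natCast_nonneg mat.length, Int.natCast_nonneg m]
          have hm0 : m = 0 := by
            have : ((mat.length : Int)) * (m : Int) = 0 := by rw [hguard, hr0]; ring
            have hlpos : 0 < mat.length := by rw [hmat]; simp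
            have := this
            rcases mul_eq_zero.mp this with h | h
            · exact absurd h (by exact_mod_cast hlpos.ne')
            · exact_mod_cast h
          rw [hflatlen, hm0, Nat.mul_zero]
          rw [show ((0 : Nat) : Int) = (0 : Int) from rfl, pyRange_zero_zero,
            hr0, pyRange_zero_zero]
          simp
    · rw [if_pos (by simpa using hguard), if_pos (by simpa using hguard)]
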